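-- pv_equiv track=rewrite | github.com/daguilarc/CSVparse_hcd_apr | TabeA2-ACSv2/acs_v2.py | validate_anchor_spacings
-- ===== SOURCE A (Python) =====
-- ANCHOR_CHAIN = [
--     (0, "JURIS", "juris"), (1, "JURIS_NAME", "juris_name"), (2, "YEAR", "year"),
--     (9, "TENURE", "owner_renter"), (17, "ENT_DATE", "date"), (26, "ISS_DATE", "date"),
--     (35, "CO_DATE", "date"), (39, "INFILL", "yn"), (45, "DEM_OR_DES", "no_comma_quote"),
--     (46, "DEM_OWN_RENT", "owner_renter"), (50, "YN_COL", "yn"),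
-- ]
--
-- ANCHOR_SPACINGS = {
--     ("JURIS", "JURIS_NAME"): 1, ("JURIS_NAME", "YEAR"): 1,
--     ("YEAR", "TENURE"): 7, ("TENURE", "ENT_DATE"): 8, ("ENT_DATE", "ISS_DATE"): 9,
--     ("ISS_DATE", "CO_DATE"): 9, ("CO_DATE", "INFILL"): 4, ("INFILL", "DEM_OR_DES"): 6,
--     ("DEM_OR_DES", "DEM_OWN_RENT"): 1, ("DEM_OWN_RENT", "YN_COL"): 4,
-- }
--
-- def validate_anchor_spacings(anchor_shifts):
--     """Cross-validate that anchor spacings match expected values."""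
--     valid_pairs, invalid_pairs = 0, 0
--     failed_info = []
--     for i in range(len(ANCHOR_CHAIN) - 1):
--         col1, name1, _ = ANCHOR_CHAIN[i]
--         col2, name2, _ = ANCHOR_CHAIN[i + 1]
--         if col1 in anchor_shifts and col2 in anchor_shifts:
--             pos1, _ = anchor_shifts[col1]
--             pos2, _ = anchor_shifts[col2]
--             actual = pos2 - pos1
--             expected = ANCHOR_SPACINGS.get((name1, name2))
--             if expected and actual == expected:
--                 valid_pairs += 1
--             elif expected:
--                 invalid_pairs += 1
--                 failed_info.append((name1, name2, actual, expected))
--     return valid_pairs, invalid_pairs, failed_info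
-- ===== SOURCE B (Python) =====
-- ANCHOR_CHAIN = [
--     (0, "JURIS", "juris"), (1, "JURIS_NAME", "juris_name"), (2, "YEAR", "year"),
--     (9, "TENURE", "owner_renter"), (17, "ENT_DATE", "date"), (26, "ISS_DATE", "date"),
--     (35, "CO_DATE", "date"), (39, "INFILL", "yn"), (45, "DEM_OR_DES", "no_comma_quote"),
--     (46, "DEM_OWN_RENT", "owner_renter"), (50, "YN_COL", "yn"),
-- ]
--
-- ANCHOR_SPACINGS = {
--     ("JURIS", "JURIS_NAME"): 1, ("JURIS_NAME", "YEAR"): 1,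
--     ("YEAR", "TENURE"): 7, ("TENURE", "ENT_DATE"): 8, ("ENT_DATE", "ISS_DATE"): 9,
--     ("ISS_DATE", "CO_DATE"): 9, ("CO_DATE", "INFILL"): 4, ("INFILL", "DEM_OR_DES"): 6,
--     ("DEM_OR_DES", "DEM_OWN_RENT"): 1, ("DEM_OWN_RENT", "YN_COL"): 4,
-- }
--
--
-- def validate_anchor_spacings(anchor_shifts):
--     """Cross-validate that anchor spacings match expected values."""
--     name_to_col = {name: col for col, name, _ in ANCHOR_CHAIN}
--     valid_pairs = 0
--     failed_info = []
--     for (name1, name2), expected in ANCHOR_SPACINGS.items():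
--         col1, col2 = name_to_col[name1], name_to_col[name2]
--         if col1 in anchor_shifts and col2 in anchor_shifts:
--             actual = anchor_shifts[col2][0] - anchor_shifts[col1][0]
--             if actual == expected:
--                 valid_pairs += 1
--             else:
--                 failed_info.append((name1, name2, actual, expected))
--     return valid_pairs, len(failed_info), failed_info
-- ===== Notes on version B (the rewrite author's own statement) =====
-- stated objective: idiomatic
-- what changed: B is table-driven: it builds a name->column map from ANCHOR_CHAIN once and iterates directly over the ANCHOR_SPACINGS expectations (dropping the index walk over consecutive chain entries, the Optional .get and the truthiness guard), and derives invalid_pairs as len(failed_info) instead of carrying a second counter.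
import Mathlib
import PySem

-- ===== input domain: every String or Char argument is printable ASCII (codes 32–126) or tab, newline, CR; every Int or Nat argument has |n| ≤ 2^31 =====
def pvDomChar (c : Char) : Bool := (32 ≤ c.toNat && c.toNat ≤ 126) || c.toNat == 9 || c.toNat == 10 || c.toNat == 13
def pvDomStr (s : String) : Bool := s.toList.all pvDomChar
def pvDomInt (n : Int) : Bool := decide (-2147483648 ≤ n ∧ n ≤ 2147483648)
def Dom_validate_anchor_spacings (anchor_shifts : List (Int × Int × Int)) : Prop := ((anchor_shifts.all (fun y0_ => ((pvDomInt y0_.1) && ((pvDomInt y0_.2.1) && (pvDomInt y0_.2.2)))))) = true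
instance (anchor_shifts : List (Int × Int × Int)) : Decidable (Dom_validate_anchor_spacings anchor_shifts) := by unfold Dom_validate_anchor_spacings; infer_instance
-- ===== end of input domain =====

-- B replaces A's index walk over consecutive ANCHOR_CHAIN entries by a table-driven loop over
-- the ANCHOR_SPACINGS expectations with a name->column map, deriving invalid_pairs as the
-- length of failed_info (objective: idiomatic; same cost, fixed 10 pairs).

-- ===== PORT A =====
def pvChain : List (Int × String × String) :=
  [(0, "JURIS", "juris"), (1, "JURIS_NAME", "juris_name"), (2, "YEAR", "year"),
   (9, "TENURE", "owner_renter"), (17, "ENT_DATE", "date"), (26, "ISS_DATE", "date"),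
   (35, "CO_DATE", "date"), (39, "INFILL", "yn"), (45, "DEM_OR_DES", "no_comma_quote"),
   (46, "DEM_OWN_RENT", "owner_renter"), (50, "YN_COL", "yn")]

def pvSpacings : PySem.Dict (String × String) Int :=
  PySem.Dict.ofList
    [(("JURIS", "JURIS_NAME"), 1), (("JURIS_NAME", "YEAR"), 1),
     (("YEAR", "TENURE"), 7), (("TENURE", "ENT_DATE"), 8), (("ENT_DATE", "ISS_DATE"), 9),
     (("ISS_DATE", "CO_DATE"), 9), (("CO_DATE", "INFILL"), 4), (("INFILL", "DEM_OR_DES"), 6),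
     (("DEM_OR_DES", "DEM_OWN_RENT"), 1), (("DEM_OWN_RENT", "YN_COL"), 4)]

-- A's loop body for one index i of range(len(ANCHOR_CHAIN)-1)
def pvAStep (shifts : PySem.Dict Int (Int × Int))
    (st : Int × Int × List (String × String × Int × Int)) (i : Int) :
    Int × Int × List (String × String × Int × Int) :=
  match PySem.List.pyGet? pvChain i, PySem.List.pyGet? pvChain (i + 1) with
  | some (col1, name1, _), some (col2, name2, _) =>
    -- 'col1 in anchor_shifts and col2 in anchor_shifts', then unpack anchor_shifts[col]
    match shifts.get? col1, shifts.get? col2 with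
    | some (pos1, _), some (pos2, _) =>
      let actual := pos2 - pos1
      -- 'if expected and actual == expected: … elif expected: …' (Option + int truthiness)
      match pvSpacings.get? (name1, name2) with
      | some expected =>
        if expected ≠ 0 then
          if actual = expected then (st.1 + 1, st.2.1, st.2.2)
          else (st.1, st.2.1 + 1, st.2.2 ++ [(name1, name2, actual, expected)])
        else st
      | none => st
    | _, _ => st
  | _, _ => st  -- unreachable: i is always in range of the constant chain

def validate_anchor_spacings (anchor_shifts : List (Int × Int × Int)) :
    Int × Int × (List (String × String × Int × Int)) :=
  (PySem.List.pyRange 0 ((pvChain.length : Int) - 1) 1).foldl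
    (pvAStep (PySem.Dict.ofList anchor_shifts)) (0, 0, [])

-- ===== PORT B =====
-- {name: col for col, name, _ in ANCHOR_CHAIN}
def pvNameToCol : PySem.Dict String Int :=
  pvChain.foldl (fun d t => d.insert t.2.1 t.1) PySem.Dict.empty

-- B's loop body for one ((name1, name2), expected) item of ANCHOR_SPACINGS
def pvBStep (shifts : PySem.Dict Int (Int × Int))
    (st : Int × List (String × String × Int × Int))
    (item : (String × String) × Int) : Int × List (String × String × Int × Int) :=
  let name1 := item.1.1
  let name2 := item.1.2
  let expected := item.2
  match pvNameToCol.get? name1, pvNameToCol.get? name2 with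
  | some col1, some col2 =>
    match shifts.get? col1, shifts.get? col2 with
    | some p1, some p2 =>
      let actual := p2.1 - p1.1
      if actual = expected then (st.1 + 1, st.2)
      else (st.1, st.2 ++ [(name1, name2, actual, expected)])
    | _, _ => st
  | _, _ => st  -- unreachable: the name map contains every chain name

def validate_anchor_spacings_alt (anchor_shifts : List (Int × Int × Int)) :
    Int × Int × (List (String × String × Int × Int)) :=
  let r := pvSpacings.items.foldl (pvBStep (PySem.Dict.ofList anchor_shifts)) (0, [])
  (r.1, (r.2.length : Int), r.2)

-- ===== PRECONDITION & SPEC =====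
def Spec_validate_anchor_spacings (anchor_shifts : List (Int × Int × Int)) (out : Int × Int × (List (String × String × Int × Int))) : Prop := out = validate_anchor_spacings_alt anchor_shifts
instance (anchor_shifts : List (Int × Int × Int)) (out : Int × Int × (List (String × String × Int × Int))) : Decidable (Spec_validate_anchor_spacings anchor_shifts out) := by unfold Spec_validate_anchor_spacings; infer_instance

-- ===== CLAIM (what is proved, stated in full; the proofs are below) =====
def Claim_equal_validate_anchor_spacings : Prop := ∀ (anchor_shifts : List (Int × Int × Int)), Dom_validate_anchor_spacings anchor_shifts → Spec_validate_anchor_spacings anchor_shifts (validate_anchor_spacings anchor_shifts)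

-- ===== LEMMAS AND PROOFS =====

-- The ten (col1, name1, col2, name2, expected) comparisons both loops perform, in order.
def pvPairs : List (Int × String × Int × String × Int) :=
  [(0, "JURIS", 1, "JURIS_NAME", 1), (1, "JURIS_NAME", 2, "YEAR", 1),
   (2, "YEAR", 9, "TENURE", 7), (9, "TENURE", 17, "ENT_DATE", 8),
   (17, "ENT_DATE", 26, "ISS_DATE", 9), (26, "ISS_DATE", 35, "CO_DATE", 9),
   (35, "CO_DATE", 39, "INFILL", 4), (39, "INFILL", 45, "DEM_OR_DES", 6),
   (45, "DEM_OR_DES", 46, "DEM_OWN_RENT", 1), (46, "DEM_OWN_RENT", 50, "YN_COL", 4)]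

def pvStepA (shifts : PySem.Dict Int (Int × Int))
    (st : Int × Int × List (String × String × Int × Int))
    (q : Int × String × Int × String × Int) :
    Int × Int × List (String × String × Int × Int) :=
  match shifts.get? q.1, shifts.get? q.2.2.1 with
  | some (pos1, _), some (pos2, _) =>
    if pos2 - pos1 = q.2.2.2.2 then (st.1 + 1, st.2.1, st.2.2)
    else (st.1, st.2.1 + 1, st.2.2 ++ [(q.2.1, q.2.2.2.1, pos2 - pos1, q.2.2.2.2)])
  | _, _ => st

def pvStepB (shifts : PySem.Dict Int (Int × Int))
    (st : Int × List (String × String × Int × Int))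
    (q : Int × String × Int × String × Int) :
    Int × List (String × String × Int × Int) :=
  match shifts.get? q.1, shifts.get? q.2.2.1 with
  | some p1, some p2 =>
    if p2.1 - p1.1 = q.2.2.2.2 then (st.1 + 1, st.2)
    else (st.1, st.2 ++ [(q.2.1, q.2.2.2.1, p2.1 - p1.1, q.2.2.2.2)])
  | _, _ => st

lemma pvFold_AB (shifts : PySem.Dict Int (Int × Int))
    (qs : List (Int × String × Int × String × Int)) :
    ∀ (v : Int) (l : List (String × String × Int × Int)),
    qs.foldl (pvStepA shifts) (v, (l.length : Int), l)
      = (let r := qs.foldl (pvStepB shifts) (v, l); (r.1, (r.2.length : Int), r.2)) := by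
  induction qs with
  | nil => intro v l; simp
  | cons q qs ih =>
    intro v l
    simp only [List.foldl_cons]
    rcases h1 : shifts.get? q.1 with _ | ⟨x1, y1⟩ <;> rcases h2 : shifts.get? q.2.2.1 with _ | ⟨x2, y2⟩ <;>
      simp only [pvStepA, pvStepB, h1, h2] <;> try exact ih v l
    by_cases hc : x2 - x1 = q.2.2.2.2
    · simp only [hc, if_pos]; exact ih (v + 1) l
    · simp only [if_neg hc]
      have := ih v (l ++ [(q.2.1, q.2.2.2.1, x2 - x1, q.2.2.2.2)])
      simpa using this

-- per-iteration correspondence of each loop body with the common step (all definitional)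
lemma pvA0 (shifts : PySem.Dict Int (Int × Int)) (st : Int × Int × List (String × String × Int × Int)) :
    pvAStep shifts st 0 = pvStepA shifts st (0, "JURIS", 1, "JURIS_NAME", 1) := rfl
lemma pvA1 (shifts : PySem.Dict Int (Int × Int)) (st : Int × Int × List (String × String × Int × Int)) :
    pvAStep shifts st 1 = pvStepA shifts st (1, "JURIS_NAME", 2, "YEAR", 1) := rfl
lemma pvA2 (shifts : PySem.Dict Int (Int × Int)) (st : Int × Int × List (String × String × Int × Int)) :
    pvAStep shifts st 2 = pvStepA shifts st (2, "YEAR", 9, "TENURE", 7) := rfl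
lemma pvA3 (shifts : PySem.Dict Int (Int × Int)) (st : Int × Int × List (String × String × Int × Int)) :
    pvAStep shifts st 3 = pvStepA shifts st (9, "TENURE", 17, "ENT_DATE", 8) := rfl
lemma pvA4 (shifts : PySem.Dict Int (Int × Int)) (st : Int × Int × List (String × String × Int × Int)) :
    pvAStep shifts st 4 = pvStepA shifts st (17, "ENT_DATE", 26, "ISS_DATE", 9) := rfl
lemma pvA5 (shifts : PySem.Dict Int (Int × Int)) (st : Int × Int × List (String × String × Int × Int)) :
    pvAStep shifts st 5 = pvStepA shifts st (26, "ISS_DATE", 35, "CO_DATE", 9) := rfl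
lemma pvA6 (shifts : PySem.Dict Int (Int × Int)) (st : Int × Int × List (String × String × Int × Int)) :
    pvAStep shifts st 6 = pvStepA shifts st (35, "CO_DATE", 39, "INFILL", 4) := rfl
lemma pvA7 (shifts : PySem.Dict Int (Int × Int)) (st : Int × Int × List (String × String × Int × Int)) :
    pvAStep shifts st 7 = pvStepA shifts st (39, "INFILL", 45, "DEM_OR_DES", 6) := rfl
lemma pvA8 (shifts : PySem.Dict Int (Int × Int)) (st : Int × Int × List (String × String × Int × Int)) :
    pvAStep shifts st 8 = pvStepA shifts st (45, "DEM_OR_DES", 46, "DEM_OWN_RENT", 1) := rfl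
lemma pvA9 (shifts : PySem.Dict Int (Int × Int)) (st : Int × Int × List (String × String × Int × Int)) :
    pvAStep shifts st 9 = pvStepA shifts st (46, "DEM_OWN_RENT", 50, "YN_COL", 4) := rfl
lemma pvB0 (shifts : PySem.Dict Int (Int × Int)) (st : Int × List (String × String × Int × Int)) :
    pvBStep shifts st (("JURIS", "JURIS_NAME"), 1) = pvStepB shifts st (0, "JURIS", 1, "JURIS_NAME", 1) := rfl
lemma pvB1 (shifts : PySem.Dict Int (Int × Int)) (st : Int × List (String × String × Int × Int)) :
    pvBStep shifts st (("JURIS_NAME", "YEAR"), 1) = pvStepB shifts st (1, "JURIS_NAME", 2, "YEAR", 1) := rfl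
lemma pvB2 (shifts : PySem.Dict Int (Int × Int)) (st : Int × List (String × String × Int × Int)) :
    pvBStep shifts st (("YEAR", "TENURE"), 7) = pvStepB shifts st (2, "YEAR", 9, "TENURE", 7) := rfl
lemma pvB3 (shifts : PySem.Dict Int (Int × Int)) (st : Int × List (String × String × Int × Int)) :
    pvBStep shifts st (("TENURE", "ENT_DATE"), 8) = pvStepB shifts st (9, "TENURE", 17, "ENT_DATE", 8) := rfl
lemma pvB4 (shifts : PySem.Dict Int (Int × Int)) (st : Int × List (String × String × Int × Int)) :
    pvBStep shifts st (("ENT_DATE", "ISS_DATE"), 9) = pvStepB shifts st (17, "ENT_DATE", 26, "ISS_DATE", 9) := rfl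
lemma pvB5 (shifts : PySem.Dict Int (Int × Int)) (st : Int × List (String × String × Int × Int)) :
    pvBStep shifts st (("ISS_DATE", "CO_DATE"), 9) = pvStepB shifts st (26, "ISS_DATE", 35, "CO_DATE", 9) := rfl
lemma pvB6 (shifts : PySem.Dict Int (Int × Int)) (st : Int × List (String × String × Int × Int)) :
    pvBStep shifts st (("CO_DATE", "INFILL"), 4) = pvStepB shifts st (35, "CO_DATE", 39, "INFILL", 4) := rfl
lemma pvB7 (shifts : PySem.Dict Int (Int × Int)) (st : Int × List (String × String × Int × Int)) :
    pvBStep shifts st (("INFILL", "DEM_OR_DES"), 6) = pvStepB shifts st (39, "INFILL", 45, "DEM_OR_DES", 6) := rfl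
lemma pvB8 (shifts : PySem.Dict Int (Int × Int)) (st : Int × List (String × String × Int × Int)) :
    pvBStep shifts st (("DEM_OR_DES", "DEM_OWN_RENT"), 1) = pvStepB shifts st (45, "DEM_OR_DES", 46, "DEM_OWN_RENT", 1) := rfl
lemma pvB9 (shifts : PySem.Dict Int (Int × Int)) (st : Int × List (String × String × Int × Int)) :
    pvBStep shifts st (("DEM_OWN_RENT", "YN_COL"), 4) = pvStepB shifts st (46, "DEM_OWN_RENT", 50, "YN_COL", 4) := rfl

lemma pvA_eq (shifts : PySem.Dict Int (Int × Int)) (st : Int × Int × List (String × String × Int × Int)) :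
    (PySem.List.pyRange 0 ((pvChain.length : Int) - 1) 1).foldl (pvAStep shifts) st
      = pvPairs.foldl (pvStepA shifts) st := by
  have hr : PySem.List.pyRange 0 ((pvChain.length : Int) - 1) 1 = [0,1,2,3,4,5,6,7,8,9] := rfl
  rw [hr]
  simp only [pvPairs, List.foldl_cons, List.foldl_nil, pvA0, pvA1, pvA2, pvA3, pvA4, pvA5, pvA6, pvA7, pvA8, pvA9]

lemma pvB_eq (shifts : PySem.Dict Int (Int × Int)) (st : Int × List (String × String × Int × Int)) :
    pvSpacings.items.foldl (pvBStep shifts) st = pvPairs.foldl (pvStepB shifts) st := by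
  have hi : pvSpacings.items = [(("JURIS", "JURIS_NAME"), (1 : Int)), (("JURIS_NAME", "YEAR"), 1),
      (("YEAR", "TENURE"), 7), (("TENURE", "ENT_DATE"), 8), (("ENT_DATE", "ISS_DATE"), 9),
      (("ISS_DATE", "CO_DATE"), 9), (("CO_DATE", "INFILL"), 4), (("INFILL", "DEM_OR_DES"), 6),
      (("DEM_OR_DES", "DEM_OWN_RENT"), 1), (("DEM_OWN_RENT", "YN_COL"), 4)] := rfl
  rw [hi]
  simp only [pvPairs, List.foldl_cons, List.foldl_nil, pvB0, pvB1, pvB2, pvB3, pvB4, pvB5, pvB6, pvB7, pvB8, pvB9]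

-- ===== VERDICT (by name: the statement is the Claim_ definition above) =====
theorem validate_anchor_spacings_spec : Claim_equal_validate_anchor_spacings := by
  intro a _
  show validate_anchor_spacings a = validate_anchor_spacings_alt a
  unfold validate_anchor_spacings validate_anchor_spacings_alt
  rw [pvA_eq, pvB_eq]
  exact pvFold_AB (PySem.Dict.ofList a) pvPairs 0 []
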